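-- pv_equiv track=rewrite | github.com/johnforgit/leetcode | Leetcode3839. Number of prefix connected groups/Solution.py | prefixConnected
-- ===== SOURCE A (Python) =====
-- from typing import List
--
-- from collections import defaultdict
--
-- def prefixConnected(words: List[str], k: int) -> int:
--     count=0
--     prefixc=defaultdict(int)
--     for i in words:
--         if len(i)<k:
--             continue
--         pre = i[:k]
--         prefixc[pre]+=1
--     for key,val in prefixc.items():
--         if val>=2:
--             count+=1
--     return count
-- ===== SOURCE B (Python) =====
-- def prefixConnected(words, k):
--     prefixes = sorted(w[:k] for w in words if len(w) >= k)
--     count = 0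
--     prev = None
--     counted = False
--     for p in prefixes:
--         if prev is not None and p == prev:
--             if not counted:
--                 count += 1
--                 counted = True
--         else:
--             counted = False
--         prev = p
--     return count
-- ===== Notes on version B (the rewrite author's own statement) =====
-- stated objective: alternative
-- what changed: Replaces the defaultdict frequency table (count then scan items for val>=2) with sort-then-adjacent-scan: the eligible prefixes are sorted and a single pass counts each run of equal prefixes once when its second element is seen.
import Mathlib
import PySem

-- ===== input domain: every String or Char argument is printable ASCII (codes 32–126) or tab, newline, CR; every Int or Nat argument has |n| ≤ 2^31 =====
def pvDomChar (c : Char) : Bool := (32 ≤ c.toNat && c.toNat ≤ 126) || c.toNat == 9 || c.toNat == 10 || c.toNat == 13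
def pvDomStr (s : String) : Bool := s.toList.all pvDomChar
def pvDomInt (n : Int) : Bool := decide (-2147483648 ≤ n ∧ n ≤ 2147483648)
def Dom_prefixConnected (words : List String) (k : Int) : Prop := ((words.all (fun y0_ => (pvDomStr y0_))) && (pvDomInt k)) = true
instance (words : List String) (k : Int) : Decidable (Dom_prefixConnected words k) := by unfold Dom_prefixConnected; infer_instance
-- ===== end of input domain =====

-- B replaces A's defaultdict counter with sort-then-adjacent-scan (an alternative algorithm, same value).

-- ===== PORT A =====
def prefixConnected (words : List String) (k : Int) : Int :=
  let prefixc := words.foldl (fun d i =>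
    if PySem.Str.len i < k then d
    else d.modify (PySem.Str.slice i none (some k)) (0 : Int) (· + 1)) PySem.Dict.empty
  prefixc.items.foldl (fun count kv => if kv.2 ≥ 2 then count + 1 else count) 0

-- ===== PORT B =====
-- one pass over the sorted prefixes: prev = last seen, counted = current run already counted
def pcGo : List String → Option String → Bool → Int → Int
  | [], _, _, count => count
  | p :: rest, prev, counted, count =>
    if prev = some p then
      if counted then pcGo rest (some p) true count
      else pcGo rest (some p) true (count + 1)
    else pcGo rest (some p) false count

def prefixConnected_alt (words : List String) (k : Int) : Int :=
  let prefixes := PySem.List.sorted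
    ((words.filter (fun w => k ≤ PySem.Str.len w)).map
      (fun w => PySem.Str.slice w none (some k))) (fun x => x) false
  pcGo prefixes none false 0

-- ===== PRECONDITION & SPEC =====
def Spec_prefixConnected (words : List String) (k : Int) (out : Int) : Prop := out = prefixConnected_alt words k
instance (words : List String) (k : Int) (out : Int) : Decidable (Spec_prefixConnected words k out) := by unfold Spec_prefixConnected; infer_instance

-- ===== CLAIM (what is proved, stated in full; the proofs are below) =====
def Claim_equal_prefixConnected : Prop := ∀ (words : List String) (k : Int), Dom_prefixConnected words k → Spec_prefixConnected words k (prefixConnected words k)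

-- ===== LEMMAS AND PROOFS =====

-- number of distinct values occurring at least twice in l
def dcnt (l : List String) : Int := ((l.toFinset.filter (fun v => 2 ≤ l.count v)).card : Int)
-- same, excluding the value p
def dex (l : List String) (p : String) : Int :=
  ((l.toFinset.filter (fun v => v ≠ p ∧ 2 ≤ l.count v)).card : Int)

lemma dex_cons_self (xs : List String) (p : String) : dex (p :: xs) p = dex xs p := by
  unfold dex
  congr 1
  rw [List.toFinset_cons, Finset.filter_insert]
  simp only [ne_eq, not_true_eq_false, false_and, if_false]
  congr 1
  apply Finset.filter_congr
  intro v hv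
  by_cases hvp : v = p
  · simp [hvp]
  · have h2 : p ≠ v := fun e => hvp e.symm
    simp [hvp, h2]

lemma dex_not_mem (l : List String) (p : String) (h : p ∉ l) : dex l p = dcnt l := by
  unfold dex dcnt
  congr 2
  apply Finset.filter_congr
  intro v hv
  have hv' : v ≠ p := fun e => h (e ▸ List.mem_toFinset.mp hv)
  simp [hv']

lemma dcnt_cons (x : String) (xs : List String) :
    dcnt (x :: xs) = (if x ∈ xs then 1 else 0) + dex xs x := by
  unfold dcnt dex
  by_cases hx : x ∈ xs
  · have hins : (x :: xs).toFinset = xs.toFinset := by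
      rw [List.toFinset_cons, Finset.insert_eq_self]
      exact List.mem_toFinset.mpr hx
    have hset : (xs.toFinset.filter (fun v => 2 ≤ (x :: xs).count v)) =
        insert x (xs.toFinset.filter (fun v => v ≠ x ∧ 2 ≤ xs.count v)) := by
      ext v
      simp only [Finset.mem_filter, Finset.mem_insert, List.mem_toFinset, List.count_cons,
        ne_eq]
      by_cases hvx : v = x
      · subst hvx
        simp [hx]
      · simp [hvx, Ne.symm hvx]
    have hnot : x ∉ xs.toFinset.filter (fun v => v ≠ x ∧ 2 ≤ xs.count v) := by
      simp
    rw [hins, hset, Finset.card_insert_of_notMem hnot, if_pos hx]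
    push_cast
    ring
  · rw [List.toFinset_cons, Finset.filter_insert]
    have hcx : ¬ 2 ≤ (x :: xs).count x := by
      have : xs.count x = 0 := List.count_eq_zero.mpr hx
      simp [this]
    rw [if_neg hcx, if_neg hx]
    have hset : (xs.toFinset.filter (fun v => 2 ≤ (x :: xs).count v)) =
        (xs.toFinset.filter (fun v => v ≠ x ∧ 2 ≤ xs.count v)) := by
      apply Finset.filter_congr
      intro v hv
      have hvx : v ≠ x := fun e => hx (e ▸ List.mem_toFinset.mp hv)
      simp [hvx, Ne.symm hvx]
    rw [hset]
    ring

lemma pcGo_spec (l : List String) (hl : l.Pairwise (· ≤ ·)) :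
    (∀ acc, pcGo l none false acc = acc + dcnt l) ∧
    (∀ p acc, (∀ y ∈ l, p ≤ y) → pcGo l (some p) true acc = acc + dex l p) ∧
    (∀ p acc, (∀ y ∈ l, p ≤ y) →
      pcGo l (some p) false acc = acc + (if p ∈ l then 1 else 0) + dex l p) := by
  induction l with
  | nil => refine ⟨fun acc => ?_, fun p acc _ => ?_, fun p acc _ => ?_⟩ <;>
      simp [pcGo, dcnt, dex]
  | cons x xs ih =>
    rw [List.pairwise_cons] at hl
    obtain ⟨hhead, htail⟩ := hl
    obtain ⟨ih0, ih1, ih2⟩ := ih htail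
    have hx_notmem : ∀ p, p ≤ x → p ≠ x → p ∉ x :: xs := by
      intro p hpx hne hmem
      rcases List.mem_cons.mp hmem with rfl | hmem'
      · exact hne rfl
      · exact hne (le_antisymm hpx (hhead p hmem'))
    refine ⟨fun acc => ?_, fun p acc hp => ?_, fun p acc hp => ?_⟩
    · simp only [pcGo, reduceCtorEq, if_false]
      rw [ih2 x acc hhead, dcnt_cons]
      ring
    · by_cases hpx : p = x
      · subst hpx
        simp only [pcGo, reduceIte]
        rw [ih1 p acc (fun y hy => hhead y hy), dex_cons_self]
      · have hcond : ¬ ((some p : Option String) = some x) := by simp [hpx]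
        simp only [pcGo, if_neg hcond]
        rw [ih2 x acc hhead]
        have hnm : p ∉ x :: xs := hx_notmem p (hp x (List.mem_cons_self)) hpx
        rw [dex_not_mem _ _ hnm, dcnt_cons]
        ring
    · by_cases hpx : p = x
      · subst hpx
        simp only [pcGo, reduceIte, Bool.false_eq_true, if_false]
        rw [ih1 p (acc + 1) (fun y hy => hhead y hy), dex_cons_self,
          if_pos (List.mem_cons_self)]
      · have hcond : ¬ ((some p : Option String) = some x) := by simp [hpx]
        simp only [pcGo, if_neg hcond]
        rw [ih2 x acc hhead]
        have hnm : p ∉ x :: xs := hx_notmem p (hp x (List.mem_cons_self)) hpx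
        rw [dex_not_mem _ _ hnm, dcnt_cons, if_neg hnm]
        ring

lemma dcnt_perm {l₁ l₂ : List String} (h : l₁.Perm l₂) : dcnt l₁ = dcnt l₂ := by
  unfold dcnt
  have hset : l₁.toFinset = l₂.toFinset := by
    ext v; simp [h.mem_iff]
  congr 2
  rw [hset]
  apply Finset.filter_congr
  intro v hv
  simp [h.count_eq]

-- A's skip-loop over words builds the counter of the eligible prefixes
lemma foldA (words : List String) (k : Int) (d : PySem.Dict String Int) :
    words.foldl (fun d i =>
      if PySem.Str.len i < k then d
      else d.modify (PySem.Str.slice i none (some k)) (0 : Int) (· + 1)) d =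
    ((words.filter (fun w => k ≤ PySem.Str.len w)).map
      (fun w => PySem.Str.slice w none (some k))).foldl
      (fun d x => d.modify x 0 (· + 1)) d := by
  induction words generalizing d with
  | nil => rfl
  | cons w ws ih =>
    by_cases h : PySem.Str.len w < k
    · rw [List.foldl_cons, if_pos h,
        List.filter_cons_of_neg (by simpa [PySem.Str.len_eq] using h), ih]
    · rw [List.foldl_cons, if_neg h,
        List.filter_cons_of_pos (by simpa [PySem.Str.len_eq] using not_lt.mp h), List.map_cons,
        List.foldl_cons, ih]

lemma foldl_count2 (l : List (String × Int)) (a : Int) :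
    l.foldl (fun count kv => if kv.2 ≥ 2 then count + 1 else count) a
      = a + ((l.filter (fun kv => decide (kv.2 ≥ 2))).length : Int) := by
  induction l generalizing a with
  | nil => simp
  | cons x xs ih =>
    rw [List.foldl_cons, List.filter_cons]
    by_cases h : x.2 ≥ 2
    · rw [if_pos h, if_pos (by simp [h]), ih]
      push_cast [List.length_cons]
      ring
    · rw [if_neg h, if_neg (by simp [h])]
      exact ih a

lemma countP_dedup_eq_dcnt (l : List String) :
    ((PySem.List.dedup l).countP (fun v => decide ((l.count v : Int) ≥ 2)) : Int) = dcnt l := by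
  unfold dcnt
  rw [List.countP_eq_length_filter]
  have hnd : ((PySem.List.dedup l).filter
      (fun v => decide ((l.count v : Int) ≥ 2))).Nodup :=
    (PySem.List.nodup_dedup l).filter _
  rw [← List.toFinset_card_of_nodup hnd]
  congr 2
  ext v
  simp only [List.mem_toFinset, List.mem_filter, PySem.List.mem_dedup,
    Finset.mem_filter, decide_eq_true_eq, ge_iff_le]
  constructor
  · rintro ⟨h1, h2⟩; exact ⟨h1, by omega⟩
  · rintro ⟨h1, h2⟩; exact ⟨h1, by omega⟩

-- ===== VERDICT (by name: the statement is the Claim_ definition above) =====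
theorem prefixConnected_spec : Claim_equal_prefixConnected := by
  unfold Claim_equal_prefixConnected
  intro words k _
  unfold Spec_prefixConnected prefixConnected prefixConnected_alt
  simp only []
  set ps := ((words.filter (fun w => k ≤ PySem.Str.len w)).map
      (fun w => PySem.Str.slice w none (some k))) with hps
  -- A side: the skip-loop is the counter of ps; items of the counter are (v, count v ps)
  rw [foldA words k PySem.Dict.empty, ← PySem.Dict.counter_eq_foldl,
    PySem.Dict.items_counter, ← PySem.List.dedup_eq_ofList, ← hps]
  rw [foldl_count2, List.filter_map, List.length_map, ← List.countP_eq_length_filter]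
  -- B side: the scan over the sorted list counts the distinct duplicated prefixes
  have hpw : (PySem.List.sorted ps (fun x => x) false).Pairwise (· ≤ ·) := by
    simpa using PySem.List.sorted_pairwise ps (fun x => x)
  rw [(pcGo_spec _ hpw).1 0, dcnt_perm (PySem.List.sorted_perm ps (fun x => x) false)]
  rw [← countP_dedup_eq_dcnt ps]
  simp [Function.comp_def, ge_iff_le]
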